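-- pv_equiv track=rewrite | github.com/YichenZW/Robust-Det | paraphrase_gen_util.py | compare_bigram_overlap
-- ===== SOURCE A (Python) =====
-- from collections import Counter
--
-- def compare_bigram_overlap(input_bigram, para_bigram):
--     input_c = Counter(input_bigram)
--     para_c = Counter(para_bigram)
--     intersection = list(input_c.keys() & para_c.keys())
--     overlap = 0
--     for i in intersection:
--         overlap += input_c[i]
--     return overlap
-- ===== SOURCE B (Python) =====
-- def compare_bigram_overlap(input_bigram, para_bigram):
--     para_set = set(para_bigram)
--     overlap = 0
--     for bg in input_bigram:
--         if bg in para_set: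
--             overlap += 1
--     return overlap
-- ===== Notes on version B (the rewrite author's own statement) =====
-- stated objective: simpler
-- what changed: Replaces the two-Counter build plus key-set intersection and a sum of counts over intersected keys with a single membership set over para_bigram and one direct pass over input_bigram counting hits.
import Mathlib
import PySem

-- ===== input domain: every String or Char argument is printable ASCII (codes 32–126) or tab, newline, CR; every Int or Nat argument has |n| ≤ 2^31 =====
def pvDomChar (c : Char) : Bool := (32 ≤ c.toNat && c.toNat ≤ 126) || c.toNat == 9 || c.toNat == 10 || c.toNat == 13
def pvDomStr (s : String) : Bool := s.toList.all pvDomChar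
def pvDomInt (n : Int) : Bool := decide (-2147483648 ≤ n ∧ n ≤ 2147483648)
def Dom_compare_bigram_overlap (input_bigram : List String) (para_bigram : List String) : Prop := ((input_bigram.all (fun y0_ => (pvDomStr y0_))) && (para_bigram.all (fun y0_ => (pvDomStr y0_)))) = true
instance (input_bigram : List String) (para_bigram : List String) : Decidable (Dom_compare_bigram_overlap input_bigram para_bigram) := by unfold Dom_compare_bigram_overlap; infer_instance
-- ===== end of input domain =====

-- B replaces A's two Counters and key-set intersection by one membership set over
-- para_bigram and a single counting pass over input_bigram (objective: simpler).

-- ===== PORT A =====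
-- input_c = Counter(input_bigram); para_c = Counter(para_bigram);
-- intersection = list(input_c.keys() & para_c.keys())  — iterated only to SUM counts,
-- so the (hash) iteration order of the Python set cannot affect the result;
-- overlap = 0; for i in intersection: overlap += input_c[i]
def compare_bigram_overlap (input_bigram : List String) (para_bigram : List String) : Int :=
  let input_c := PySem.Dict.counter input_bigram
  let para_c := PySem.Dict.counter para_bigram
  let intersection := PySem.Set.inter input_c.keys para_c.keys
  intersection.foldl (fun overlap i => overlap + input_c.getD i 0) 0

-- ===== PORT B =====
-- para_set = set(para_bigram); overlap = 0; for bg in input_bigram: if bg in para_set: overlap += 1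
def compare_bigram_overlap_alt (input_bigram : List String) (para_bigram : List String) : Int :=
  let para_set := PySem.Set.ofList para_bigram
  input_bigram.foldl (fun overlap bg => if para_set.contains bg then overlap + 1 else overlap) 0

-- ===== PRECONDITION & SPEC =====
def Spec_compare_bigram_overlap (input_bigram : List String) (para_bigram : List String) (out : Int) : Prop := out = compare_bigram_overlap_alt input_bigram para_bigram
instance (input_bigram : List String) (para_bigram : List String) (out : Int) : Decidable (Spec_compare_bigram_overlap input_bigram para_bigram out) := by unfold Spec_compare_bigram_overlap; infer_instance

-- ===== CLAIM (what is proved, stated in full; the proofs are below) =====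
def Claim_equal_compare_bigram_overlap : Prop := ∀ (input_bigram : List String) (para_bigram : List String), Dom_compare_bigram_overlap input_bigram para_bigram → Spec_compare_bigram_overlap input_bigram para_bigram (compare_bigram_overlap input_bigram para_bigram)

-- ===== LEMMAS AND PROOFS =====

-- Summing input-counts over the distinct common keys equals counting, over the raw
-- input list, the elements that occur in para: the heart of A = B.
theorem sum_counts_inter_eq_countP (input para : List String) :
    ((PySem.Set.inter (PySem.Set.ofList input) (PySem.Set.ofList para)).map
        (fun i => List.count i input)).sum
      = List.countP (fun x => (PySem.Set.ofList para).contains x) input := by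
  rw [← List.sum_map_count_dedup_filter_eq_countP (fun x => (PySem.Set.ofList para).contains x) input]
  apply List.Perm.sum_eq
  apply List.Perm.map
  rw [List.perm_ext_iff_of_nodup
        (PySem.Set.nodup_inter _ _ (PySem.Set.nodup_ofList input))
        (List.Nodup.filter _ input.nodup_dedup)]
  intro a
  simp [PySem.Set.mem_inter, PySem.Set.mem_ofList, List.mem_filter, List.mem_dedup]

-- ===== VERDICT (by name: the statement is the Claim_ definition above) =====
theorem compare_bigram_overlap_spec : Claim_equal_compare_bigram_overlap := by
  intro input para _
  unfold Spec_compare_bigram_overlap compare_bigram_overlap compare_bigram_overlap_alt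
  simp only [PySem.List.foldl_add, PySem.List.foldl_if_add_one, PySem.Dict.keys_counter,
             zero_add]
  have h : ((PySem.Set.inter (PySem.Set.ofList input) (PySem.Set.ofList para)).map
      (fun i => (PySem.Dict.counter input).getD i 0)).sum
      = (((PySem.Set.inter (PySem.Set.ofList input) (PySem.Set.ofList para)).map
          (fun i => List.count i input)).sum : Int) := by
    rw [Nat.cast_list_sum, List.map_map]
    refine congrArg List.sum (List.map_congr_left ?_)
    intro i _
    simp [PySem.Dict.getD_counter]
  rw [h, sum_counts_inter_eq_countP]
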